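-- pv_equiv track=rewrite | github.com/202313-tc2008b/Equipo6 | MesaModelUpdated/utils/utils.py | calculate_steps_between_points
-- ===== SOURCE A (Python) =====
-- def calculate_steps_between_points(start_point, end_point):
--     x_diff = end_point[0] - start_point[0]
--     y_diff = end_point[1] - start_point[1]
--
--     steps_x = abs(x_diff)
--     steps_y = abs(y_diff)
--
--     step_increment_x = x_diff // steps_x if steps_x else 0
--     step_increment_y = y_diff // steps_y if steps_y else 0
--
--     steps = []
--     current = start_point
--     for _ in range(max(steps_x, steps_y)):
--         x = current[0] + step_increment_x
--         y = current[1] + step_increment_y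
--         current = (x, y)
--         steps.append(current)
--
--     return steps
-- ===== SOURCE B (Python) =====
-- def calculate_steps_between_points(start_point, end_point):
--     x_diff = end_point[0] - start_point[0]
--     y_diff = end_point[1] - start_point[1]
--     inc_x = x_diff // abs(x_diff) if x_diff else 0
--     inc_y = y_diff // abs(y_diff) if y_diff else 0
--     n = max(abs(x_diff), abs(y_diff))
--     return [(start_point[0] + inc_x * (i + 1), start_point[1] + inc_y * (i + 1))
--             for i in range(n)]
-- ===== Notes on version B (the rewrite author's own statement) =====
-- stated objective: simpler
-- what changed: Replaces the loop that threads a running `current` tuple and appends to a list with a closed-form index comprehension computing each point directly from the start point and the step index.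
import Mathlib
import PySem

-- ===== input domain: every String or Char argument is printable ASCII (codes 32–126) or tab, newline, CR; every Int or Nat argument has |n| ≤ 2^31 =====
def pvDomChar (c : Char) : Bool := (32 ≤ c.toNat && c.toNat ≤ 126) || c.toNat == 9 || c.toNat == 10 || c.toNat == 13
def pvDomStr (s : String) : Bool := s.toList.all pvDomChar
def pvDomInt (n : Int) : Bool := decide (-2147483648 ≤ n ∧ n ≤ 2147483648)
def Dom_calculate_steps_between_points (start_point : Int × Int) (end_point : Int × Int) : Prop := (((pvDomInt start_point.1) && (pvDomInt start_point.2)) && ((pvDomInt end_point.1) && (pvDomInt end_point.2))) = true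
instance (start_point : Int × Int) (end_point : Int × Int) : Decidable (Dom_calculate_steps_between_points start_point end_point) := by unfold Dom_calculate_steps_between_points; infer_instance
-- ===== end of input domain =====

-- ===== PORT A =====
-- B replaces the accumulator loop with an index-based closed form; same values, same cost.
def calculate_steps_between_points (start_point : Int × Int) (end_point : Int × Int) : List (Int × Int) :=
  let x_diff := end_point.1 - start_point.1
  let y_diff := end_point.2 - start_point.2
  let steps_x : Int := |x_diff|
  let steps_y : Int := |y_diff|
  let step_increment_x := if steps_x ≠ 0 then PySem.Int.floordiv x_diff steps_x else 0
  let step_increment_y := if steps_y ≠ 0 then PySem.Int.floordiv y_diff steps_y else 0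
  let res := (List.range (max steps_x steps_y).toNat).foldl
    (fun (st : (Int × Int) × List (Int × Int)) _ =>
      let x := st.1.1 + step_increment_x
      let y := st.1.2 + step_increment_y
      let current := (x, y)
      (current, st.2 ++ [current]))
    (start_point, [])
  res.2

-- ===== PORT B =====
def calculate_steps_between_points_alt (start_point : Int × Int) (end_point : Int × Int) : List (Int × Int) :=
  let x_diff := end_point.1 - start_point.1
  let y_diff := end_point.2 - start_point.2
  let inc_x := if x_diff ≠ 0 then PySem.Int.floordiv x_diff |x_diff| else 0
  let inc_y := if y_diff ≠ 0 then PySem.Int.floordiv y_diff |y_diff| else 0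
  let n := (max |x_diff| |y_diff|).toNat
  (List.range n).map (fun (i : Nat) =>
    (start_point.1 + inc_x * ((i : Int) + 1), start_point.2 + inc_y * ((i : Int) + 1)))

-- ===== PRECONDITION & SPEC =====
def Spec_calculate_steps_between_points (start_point : Int × Int) (end_point : Int × Int) (out : List (Int × Int)) : Prop := out = calculate_steps_between_points_alt start_point end_point
instance (start_point : Int × Int) (end_point : Int × Int) (out : List (Int × Int)) : Decidable (Spec_calculate_steps_between_points start_point end_point out) := by unfold Spec_calculate_steps_between_points; infer_instance

-- ===== CLAIM (what is proved, stated in full; the proofs are below) =====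
def Claim_equal_calculate_steps_between_points : Prop := ∀ (start_point : Int × Int) (end_point : Int × Int), Dom_calculate_steps_between_points start_point end_point → Spec_calculate_steps_between_points start_point end_point (calculate_steps_between_points start_point end_point)

-- ===== LEMMAS AND PROOFS =====

theorem pv_loop_inv (ix iy : Int) (c : Int × Int) (n : Nat) :
    (List.range n).foldl
      (fun (st : (Int × Int) × List (Int × Int)) _ =>
        let x := st.1.1 + ix
        let y := st.1.2 + iy
        let current := (x, y)
        (current, st.2 ++ [current]))
      (c, [])
    = ((c.1 + ix * n, c.2 + iy * n),
       (List.range n).map (fun (i : Nat) => (c.1 + ix * ((i : Int) + 1), c.2 + iy * ((i : Int) + 1)))) := by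
  induction n with
  | zero => simp
  | succ n ih =>
    rw [List.range_succ, List.foldl_append, ih, List.map_append]
    simp only [List.foldl_cons, List.foldl_nil, List.map_cons, List.map_nil]
    refine Prod.ext (Prod.ext ?_ ?_) ?_
    · push_cast
      ring
    · push_cast
      ring
    · simp only [List.append_cancel_left_eq, List.cons.injEq, and_true, Prod.mk.injEq]
      constructor <;> (push_cast; ring)

-- ===== VERDICT (by name: the statement is the Claim_ definition above) =====
theorem calculate_steps_between_points_spec : Claim_equal_calculate_steps_between_points := by
  intro sp ep _
  unfold Spec_calculate_steps_between_points calculate_steps_between_points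
    calculate_steps_between_points_alt
  simp only []
  rw [pv_loop_inv]
  simp only [abs_ne_zero]
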